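-- pv_equiv track=rewrite | github.com/JamesExley95/sleeper-player-database-2.1 | scripts/collect_byline_data.py | normalize_position
-- ===== SOURCE A (Python) =====
-- def normalize_position(position):
--     """Normalize position abbreviation to handle variations"""
--     if not position:
--         return ""
--     pos_mappings = {
--         'K': ['K', 'PK', 'KICKER'],
--         'DEF': ['DEF', 'DST', 'D/ST', 'DEFENSE'],
--         'QB': ['QB', 'QUARTERBACK'],
--         'RB': ['RB', 'RUNNINGBACK'],
--         'WR': ['WR', 'WIDE RECEIVER'],
--         'TE': ['TE', 'TIGHT END']
--     }
--     pos_upper = position.upper().strip()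
--     for canonical, variants in pos_mappings.items():
--         if pos_upper in variants:
--             return canonical
--     return pos_upper
-- ===== SOURCE B (Python) =====
-- def normalize_position(position):
--     """Normalize position abbreviation to handle variations"""
--     if not position:
--         return ""
--     p = position.upper().strip()
--     c = p[0] if p else ""
--     if c == 'K':
--         return 'K' if p in ('K', 'KICKER') else p
--     if c == 'P':
--         return 'K' if p == 'PK' else p
--     if c == 'D':
--         return 'DEF' if p in ('DEF', 'DST', 'D/ST', 'DEFENSE') else p
--     if c == 'Q':
--         return 'QB' if p in ('QB', 'QUARTERBACK') else p
--     if c == 'R':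
--         return 'RB' if p in ('RB', 'RUNNINGBACK') else p
--     if c == 'W':
--         return 'WR' if p in ('WR', 'WIDE RECEIVER') else p
--     if c == 'T':
--         return 'TE' if p in ('TE', 'TIGHT END') else p
--     return p
-- ===== Notes on version B (the rewrite author's own statement) =====
-- stated objective: alternative
-- what changed: B replaces A's scan over the canonical->variants table by a one-level trie: dispatch on the first character of the cleaned string, then an exact check within that character's few candidates, with no table data structure at all.
import Mathlib
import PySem

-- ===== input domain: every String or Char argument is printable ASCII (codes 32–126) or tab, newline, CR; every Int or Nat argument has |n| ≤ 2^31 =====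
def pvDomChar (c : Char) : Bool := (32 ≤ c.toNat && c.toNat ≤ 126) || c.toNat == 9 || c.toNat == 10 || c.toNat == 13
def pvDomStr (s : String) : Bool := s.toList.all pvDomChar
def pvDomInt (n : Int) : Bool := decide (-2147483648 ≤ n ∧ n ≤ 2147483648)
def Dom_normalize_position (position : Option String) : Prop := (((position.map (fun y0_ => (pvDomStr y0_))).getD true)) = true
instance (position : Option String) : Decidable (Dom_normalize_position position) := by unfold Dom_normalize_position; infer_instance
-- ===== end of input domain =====

-- Header: B replaces A's scan over the canonical→variants table by a one-level trie
-- (dispatch on the first character of the cleaned string, then an exact check among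
-- that character's few candidates); objective: alternative, same cost.

-- ===== PORT A =====
-- A's dict of canonical → variants, iterated in insertion order.
def pvPosMappings : List (String × List String) :=
  [("K", ["K", "PK", "KICKER"]),
   ("DEF", ["DEF", "DST", "D/ST", "DEFENSE"]),
   ("QB", ["QB", "QUARTERBACK"]),
   ("RB", ["RB", "RUNNINGBACK"]),
   ("WR", ["WR", "WIDE RECEIVER"]),
   ("TE", ["TE", "TIGHT END"])]

-- the for-loop over pos_mappings.items() with early return
def pvScanA (items : List (String × List String)) (posUpper : String) : String :=
  match items with
  | [] => posUpper
  | (canonical, variants) :: rest =>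
      if variants.contains posUpper then canonical else pvScanA rest posUpper

def normalize_position (position : Option String) : String :=
  match position with
  | none => ""
  | some s =>
      if s = "" then ""   -- 'if not position' is also true for the empty string
      else
        let posUpper := PySem.Str.strip (PySem.Str.upper s)
        pvScanA pvPosMappings posUpper

-- ===== PORT B =====
-- B's core: first-character dispatch, then exact check among that character's candidates.
def pvDispatch (p : String) : String :=
  -- c is p[0] as a 1-char string, or "" when p is empty; modelled as Option Char (none = "")
  let c : Option Char := if p = "" then none else PySem.Str.pyGet? p 0
  if c = some 'K' then (if p = "K" ∨ p = "KICKER" then "K" else p)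
  else if c = some 'P' then (if p = "PK" then "K" else p)
  else if c = some 'D' then (if p = "DEF" ∨ p = "DST" ∨ p = "D/ST" ∨ p = "DEFENSE" then "DEF" else p)
  else if c = some 'Q' then (if p = "QB" ∨ p = "QUARTERBACK" then "QB" else p)
  else if c = some 'R' then (if p = "RB" ∨ p = "RUNNINGBACK" then "RB" else p)
  else if c = some 'W' then (if p = "WR" ∨ p = "WIDE RECEIVER" then "WR" else p)
  else if c = some 'T' then (if p = "TE" ∨ p = "TIGHT END" then "TE" else p)
  else p

def normalize_position_alt (position : Option String) : String :=
  match position with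
  | none => ""
  | some s =>
      if s = "" then ""
      else
        let p := PySem.Str.strip (PySem.Str.upper s)
        pvDispatch p

-- ===== PRECONDITION & SPEC =====
def Spec_normalize_position (position : Option String) (out : String) : Prop := out = normalize_position_alt position
instance (position : Option String) (out : String) : Decidable (Spec_normalize_position position out) := by unfold Spec_normalize_position; infer_instance

-- ===== CLAIM (what is proved, stated in full; the proofs are below) =====
def Claim_equal_normalize_position : Prop := ∀ (position : Option String), Dom_normalize_position position → Spec_normalize_position position (normalize_position position)

-- ===== LEMMAS AND PROOFS =====
-- core lemma: the scan over the canonical→variants lists agrees with the first-character dispatch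
theorem pvScan_eq_dispatch (t : String) :
    pvScanA pvPosMappings t = pvDispatch t := by
  simp only [pvPosMappings, pvScanA, List.contains_cons, List.contains_nil, Bool.or_false,
    Bool.or_eq_true, beq_iff_eq]
  split_ifs with h1 h2 h3 h4 h5 h6
  · rcases h1 with h | h | h <;> subst h <;> decide
  · rcases h2 with h | h | h | h <;> subst h <;> decide
  · rcases h3 with h | h <;> subst h <;> decide
  · rcases h4 with h | h <;> subst h <;> decide
  · rcases h5 with h | h <;> subst h <;> decide
  · rcases h6 with h | h <;> subst h <;> decide
  · push Not at h1 h2 h3 h4 h5 h6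
    simp [pvDispatch, h1.1, h1.2.1, h1.2.2, h2.1, h2.2.1, h2.2.2.1, h2.2.2.2,
      h3.1, h3.2, h4.1, h4.2, h5.1, h5.2, h6.1, h6.2]

-- ===== VERDICT (by name: the statement is the Claim_ definition above) =====
theorem normalize_position_spec : Claim_equal_normalize_position := by
  intro position _
  unfold Spec_normalize_position normalize_position normalize_position_alt
  cases position with
  | none => rfl
  | some s =>
      by_cases h : s = "" <;> simp [h, pvScan_eq_dispatch]
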